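-- pv_equiv track=rewrite | github.com/dshap474/numereng | src/numereng/features/viz/store_adapter.py | _expand_metric_query_names
-- ===== SOURCE A (Python) =====
-- _METRIC_QUERY_ALIASES: dict[str, tuple[str, ...]] = {
--     "corr20v2_mean": ("corr20v2_mean", "corr.mean", "corr_mean"),
--     "corr20v2_sharpe": ("corr20v2_sharpe", "corr.sharpe", "corr_sharpe", "sharpe"),
--     "mmc_mean": ("mmc_mean", "mmc.mean"),
--     "payout_estimate_mean": ("payout_estimate_mean", "payout_score"),
--     "bmc_mean": ("bmc_mean", "bmc.mean"),
-- }
--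
-- _DERIVED_METRIC_DEPENDENCIES: dict[str, tuple[str, ...]] = {
--     "payout_estimate_mean": ("corr20v2_mean", "mmc_mean"),
-- }
--
-- def _expand_metric_query_names(metric_names: list[str]) -> list[str]:
--     """Expand canonical metric names into all known persisted aliases."""
--
--     requested: list[str] = []
--     requested_seen: set[str] = set()
--     for name in metric_names:
--         if name not in requested_seen:
--             requested_seen.add(name)
--             requested.append(name)
--         for dependency in _DERIVED_METRIC_DEPENDENCIES.get(name, ()):
--             if dependency in requested_seen:
--                 continue
--             requested_seen.add(dependency)
--             requested.append(dependency)
--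
--     expanded: list[str] = []
--     seen: set[str] = set()
--     for name in requested:
--         aliases = _METRIC_QUERY_ALIASES.get(name, (name,))
--         for alias in aliases:
--             if alias in seen:
--                 continue
--             seen.add(alias)
--             expanded.append(alias)
--     return expanded
-- ===== SOURCE B (Python) =====
-- _METRIC_QUERY_ALIASES: dict[str, tuple[str, ...]] = {
--     "corr20v2_mean": ("corr20v2_mean", "corr.mean", "corr_mean"),
--     "corr20v2_sharpe": ("corr20v2_sharpe", "corr.sharpe", "corr_sharpe", "sharpe"),
--     "mmc_mean": ("mmc_mean", "mmc.mean"),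
--     "payout_estimate_mean": ("payout_estimate_mean", "payout_score"),
--     "bmc_mean": ("bmc_mean", "bmc.mean"),
-- }
--
-- _DERIVED_METRIC_DEPENDENCIES: dict[str, tuple[str, ...]] = {
--     "payout_estimate_mean": ("corr20v2_mean", "mmc_mean"),
-- }
--
-- def _expand_metric_query_names(metric_names: list[str]) -> list[str]:
--     """Flatten every name (with its dependencies) to aliases, then dedup keeping first."""
--     flat = [alias
--             for name in metric_names
--             for elem in (name, *_DERIVED_METRIC_DEPENDENCIES.get(name, ()))
--             for alias in _METRIC_QUERY_ALIASES.get(elem, (elem,))]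
--     return list(dict.fromkeys(flat))
-- ===== Notes on version B (the rewrite author's own statement) =====
-- stated objective: alternative
-- what changed: B replaces A's two stateful seen-set passes (dedup names+deps, then dedup aliases) by a comprehension that flattens everything to a raw alias list in one shot and a final keep-first dedup via dict.fromkeys; correctness rests on dedup(flatMap f (dedup L)) = dedup(flatMap f L).
import Mathlib
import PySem

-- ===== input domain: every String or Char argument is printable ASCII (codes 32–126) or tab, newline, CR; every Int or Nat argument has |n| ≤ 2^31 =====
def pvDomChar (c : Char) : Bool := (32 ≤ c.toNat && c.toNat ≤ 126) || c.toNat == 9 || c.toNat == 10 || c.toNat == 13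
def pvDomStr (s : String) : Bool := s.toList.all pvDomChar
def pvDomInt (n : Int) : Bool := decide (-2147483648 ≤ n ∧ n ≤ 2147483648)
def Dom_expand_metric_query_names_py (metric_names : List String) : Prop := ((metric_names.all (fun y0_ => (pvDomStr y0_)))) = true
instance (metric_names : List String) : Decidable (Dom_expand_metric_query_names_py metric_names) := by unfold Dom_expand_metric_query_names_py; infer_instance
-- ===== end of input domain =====

-- B replaces A's two stateful seen-set passes by flatten-everything-to-aliases + one keep-first dedup; objective: alternative.

-- ===== PORT A =====
-- module constants (shared by both ports, as in the Python module)
def pvAliases : PySem.Dict String (List String) :=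
  PySem.Dict.ofList [("corr20v2_mean", ["corr20v2_mean", "corr.mean", "corr_mean"]),
   ("corr20v2_sharpe", ["corr20v2_sharpe", "corr.sharpe", "corr_sharpe", "sharpe"]),
   ("mmc_mean", ["mmc_mean", "mmc.mean"]),
   ("payout_estimate_mean", ["payout_estimate_mean", "payout_score"]),
   ("bmc_mean", ["bmc_mean", "bmc.mean"])]

def pvDeps : PySem.Dict String (List String) :=
  PySem.Dict.ofList [("payout_estimate_mean", ["corr20v2_mean", "mmc_mean"])]

-- A's loop body: "if x not in seen: seen.add(x); out.append(x)"
def pvAppendNew (st : List String × PySem.Set String) (x : String) :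
    List String × PySem.Set String :=
  if PySem.Set.contains st.2 x then st else (st.1 ++ [x], PySem.Set.add st.2 x)

def expand_metric_query_names_py (metric_names : List String) : List String :=
  -- pass 1: requested / requested_seen
  let p1 := metric_names.foldl
    (fun st name =>
      (PySem.Dict.getD pvDeps name []).foldl pvAppendNew (pvAppendNew st name))
    ([], PySem.Set.empty)
  -- pass 2: expanded / seen
  let p2 := p1.1.foldl
    (fun st name => (PySem.Dict.getD pvAliases name [name]).foldl pvAppendNew st)
    ([], PySem.Set.empty)
  p2.1

-- ===== PORT B =====
def expand_metric_query_names_py_alt (metric_names : List String) : List String :=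
  -- flat: the comprehension (name, then its dependencies, each expanded to its aliases)
  let flat := metric_names.flatMap (fun name =>
    (name :: PySem.Dict.getD pvDeps name []).flatMap
      (fun elem => PySem.Dict.getD pvAliases elem [elem]))
  -- list(dict.fromkeys(flat)): build the dict by inserting each alias (value None), take its keys
  (flat.foldl (fun d al => PySem.Dict.insert d al (none : Option Unit)) PySem.Dict.empty).keys

-- ===== PRECONDITION & SPEC =====
def Spec_expand_metric_query_names_py (metric_names : List String) (out : List String) : Prop := out = expand_metric_query_names_py_alt metric_names
instance (metric_names : List String) (out : List String) : Decidable (Spec_expand_metric_query_names_py metric_names out) := by unfold Spec_expand_metric_query_names_py; infer_instance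

-- ===== CLAIM (what is proved, stated in full; the proofs are below) =====
def Claim_equal_expand_metric_query_names_py : Prop := ∀ (metric_names : List String), Dom_expand_metric_query_names_py metric_names → Spec_expand_metric_query_names_py metric_names (expand_metric_query_names_py metric_names)

-- ===== LEMMAS AND PROOFS =====

-- keep-first dedup of L appended onto out (B's second stage)
def pvDD (out : List String) (L : List String) : List String :=
  L.foldl (fun out al => if al ∈ out then out else out ++ [al]) out

lemma pvDD_append (out L1 L2 : List String) :
    pvDD out (L1 ++ L2) = pvDD (pvDD out L1) L2 := by
  unfold pvDD; rw [List.foldl_append]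

lemma pvMem_pvDD (L : List String) : ∀ (out : List String) {a : String},
    a ∈ pvDD out L ↔ a ∈ out ∨ a ∈ L := by
  induction L with
  | nil => simp [pvDD]
  | cons x L ih =>
    intro out a
    rw [show pvDD out (x :: L) = pvDD (if x ∈ out then out else out ++ [x]) L from rfl]
    by_cases hx : x ∈ out
    · rw [if_pos hx, ih]
      simp only [List.mem_cons]
      constructor
      · tauto
      · rintro (h | rfl | h)
        · exact Or.inl h
        · exact Or.inl hx
        · exact Or.inr h
    · rw [if_neg hx, ih]
      simp [List.mem_append, or_assoc]

lemma pvDD_noop {L out : List String} (h : ∀ a ∈ L, a ∈ out) : pvDD out L = out := by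
  induction L with
  | nil => rfl
  | cons x L ih =>
    rw [show pvDD out (x :: L) = pvDD (if x ∈ out then out else out ++ [x]) L from rfl,
      if_pos (h x (by simp))]
    exact ih fun a ha => h a (by simp [ha])

-- A's seen-set fold, read as a list-level dedup: the set always holds exactly the
-- members of the output list, and the output is pvDD.
lemma pvFold_pvAppendNew_eq (L : List String) :
    ∀ (out : List String) (s : PySem.Set String), (∀ m, m ∈ s ↔ m ∈ out) →
    (L.foldl pvAppendNew (out, s)).1 = pvDD out L ∧
    (∀ m, m ∈ (L.foldl pvAppendNew (out, s)).2 ↔ m ∈ pvDD out L) := by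
  induction L with
  | nil => exact fun out s h => ⟨rfl, h⟩
  | cons x L ih =>
    intro out s h
    rw [List.foldl_cons,
      show pvDD out (x :: L) = pvDD (if x ∈ out then out else out ++ [x]) L from rfl]
    by_cases hx : x ∈ out
    · have : pvAppendNew (out, s) x = (out, s) := by
        unfold pvAppendNew
        rw [if_pos (by exact (PySem.Set.contains_iff s x).2 ((h x).2 hx))]
      rw [this, if_pos hx]
      exact ih out s h
    · have : pvAppendNew (out, s) x = (out ++ [x], PySem.Set.add s x) := by
        unfold pvAppendNew
        rw [if_neg (by simp [h, hx])]
      rw [this, if_neg hx]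
      exact ih _ _ fun m => by simp [PySem.Set.mem_add, h m]

-- nested "for x in g(n): append-new" loops flatten to one pvAppendNew fold
lemma pvFold_nested (g : String → List String) (names : List String) :
    ∀ st, names.foldl (fun st n => (g n).foldl pvAppendNew st) st =
      (names.flatMap g).foldl pvAppendNew st := by
  induction names with
  | nil => intro st; rfl
  | cons n names ih => intro st; simp [List.foldl_append, ih]

-- KEY: deduplicating the name list first does not change the final alias dedup
lemma pvKey (f : String → List String) (M : List String) : ∀ (req acc : List String),
    pvDD acc (M.foldl (fun r x => if x ∈ r then r else r ++ [x]) req |>.flatMap f) =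
    pvDD (pvDD acc (req.flatMap f)) (M.flatMap f) := by
  induction M with
  | nil => simp [pvDD]
  | cons x M ih =>
    intro req acc
    rw [List.foldl_cons]
    by_cases hx : x ∈ req
    · rw [if_pos hx, ih, List.flatMap_cons, pvDD_append]
      congr 1
      exact (pvDD_noop fun a ha =>
        (pvMem_pvDD _ _).2 (Or.inr (List.mem_flatMap.2 ⟨x, hx, ha⟩))).symm
    · rw [if_neg hx, ih, List.flatMap_cons, List.flatMap_append, pvDD_append,
        pvDD_append]
      simp [List.flatMap]

-- both ports as pvDD normal forms
lemma pvPortA_eq (names : List String) :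
    expand_metric_query_names_py names =
      pvDD []
        (((names.flatMap (fun n => n :: PySem.Dict.getD pvDeps n [])).foldl
            (fun r x => if x ∈ r then r else r ++ [x]) []).flatMap
          (fun n => PySem.Dict.getD pvAliases n [n])) := by
  show ((names.foldl
      (fun st name => (PySem.Dict.getD pvDeps name []).foldl pvAppendNew (pvAppendNew st name))
      ([], PySem.Set.empty)).1.foldl
      (fun st name => (PySem.Dict.getD pvAliases name [name]).foldl pvAppendNew st)
      ([], PySem.Set.empty)).1 = _
  have hempty : ∀ m : String, m ∈ (PySem.Set.empty : PySem.Set String) ↔ m ∈ ([] : List String) := by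
    simp [PySem.Set.empty]
  have h1 := pvFold_pvAppendNew_eq
    (names.flatMap (fun n => n :: PySem.Dict.getD pvDeps n [])) [] PySem.Set.empty hempty
  have hA1 : (names.foldl
      (fun st name => (PySem.Dict.getD pvDeps name []).foldl pvAppendNew (pvAppendNew st name))
      ([], PySem.Set.empty)).1 =
      pvDD [] (names.flatMap (fun n => n :: PySem.Dict.getD pvDeps n [])) := by
    rw [show (fun (st : List String × PySem.Set String) name =>
        (PySem.Dict.getD pvDeps name []).foldl pvAppendNew (pvAppendNew st name)) =
        (fun st n => ((n :: PySem.Dict.getD pvDeps n []).foldl pvAppendNew st)) from rfl,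
      pvFold_nested]
    exact h1.1
  rw [show (fun (st : List String × PySem.Set String) name =>
      (PySem.Dict.getD pvAliases name [name]).foldl pvAppendNew st) =
      (fun st n => ((PySem.Dict.getD pvAliases n [n]).foldl pvAppendNew st)) from rfl,
    pvFold_nested, hA1]
  have h2 := pvFold_pvAppendNew_eq
    ((pvDD [] (names.flatMap (fun n => n :: PySem.Dict.getD pvDeps n []))).flatMap
      (fun n => PySem.Dict.getD pvAliases n [n])) [] PySem.Set.empty hempty
  rw [h2.1]
  rfl

-- pvDD from the empty accumulator is PySem.Set.update, hence Set.ofList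
lemma pvDD_eq_update (L : List String) : ∀ s, pvDD s L = PySem.Set.update s L := by
  induction L with
  | nil => intro s; rfl
  | cons x L ih =>
    intro s
    rw [PySem.Set.update_cons,
      show pvDD s (x :: L) = pvDD (if x ∈ s then s else s ++ [x]) L from rfl,
      ← PySem.Set.add_eq_ite]
    exact ih _

lemma pvPortB_eq (names : List String) :
    expand_metric_query_names_py_alt names =
      pvDD []
        ((names.flatMap (fun n => n :: PySem.Dict.getD pvDeps n [])).flatMap
          (fun n => PySem.Dict.getD pvAliases n [n])) := by
  unfold expand_metric_query_names_py_alt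
  rw [PySem.Dict.keys_foldl_insert, PySem.Dict.keys_empty,
    PySem.Set.update_nil_left, ← List.flatMap_assoc]
  rw [show PySem.Set.ofList (α := String) = PySem.Set.update [] from funext fun xs =>
    (PySem.Set.update_nil_left xs).symm]
  rw [← pvDD_eq_update]

-- ===== VERDICT (by name: the statement is the Claim_ definition above) =====
theorem expand_metric_query_names_py_spec : Claim_equal_expand_metric_query_names_py := by
  intro names _
  unfold Spec_expand_metric_query_names_py
  rw [pvPortA_eq, pvPortB_eq]
  have := pvKey (fun n => PySem.Dict.getD pvAliases n [n])
    (names.flatMap (fun n => n :: PySem.Dict.getD pvDeps n [])) [] []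
  simpa [pvDD] using this
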